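-- pv_equiv track=rewrite | github.com/braamost/SignalFlowGraph_and_RouthCriteria | back/Mason/nontouchingdetection.py | find_non_touching_loops
-- ===== SOURCE A (Python) =====
-- def find_non_touching_loops(loops):
--     """
--     Find all combinations of non-touching loops in a signal flow graph.
--
--     Args:
--         loops: List of loops, where each loop is a list of nodes
--
--     Returns:
--         Dictionary with keys as the number of loops in combination (2, 3, etc.)
--         and values as lists of tuples, where each tuple contains indices of non-touching loops
--     """
--     non_touching_loops = {2: [], 3: [], 4: [], 5: []}  # Store combinations by size
--
--     # Check if two loops are non-touching
--     def are_non_touching(loop1, loop2):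
--         # Remove the duplicate end node from each loop for comparison
--         nodes1 = set(loop1[:-1])
--         nodes2 = set(loop2[:-1])
--         # If they share no common nodes, they are non-touching
--         return len(nodes1.intersection(nodes2)) == 0
--
--     # Find pairs of non-touching loops
--     n_loops = len(loops)
--     for i in range(n_loops):
--         for j in range(i+1, n_loops):
--             if are_non_touching(loops[i], loops[j]):
--                 non_touching_loops[2].append((i, j))
--
--     # Find triplets of non-touching loops
--     for i, j in non_touching_loops[2]:
--         for k in range(max(i, j)+1, n_loops):
--             if are_non_touching(loops[i], loops[k]) and are_non_touching(loops[j], loops[k]):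
--                 non_touching_loops[3].append((i, j, k))
--
--     # Find quadruplets of non-touching loops
--     for i, j, k in non_touching_loops[3]:
--         for l in range(max(i, j, k)+1, n_loops):
--             if (are_non_touching(loops[i], loops[l]) and
--                 are_non_touching(loops[j], loops[l]) and
--                 are_non_touching(loops[k], loops[l])):
--                 non_touching_loops[4].append((i, j, k, l))
--
--     # Find quintuplets of non-touching loops
--     for i, j, k, l in non_touching_loops[4]:
--         for m in range(max(i, j, k, l)+1, n_loops):
--             if (are_non_touching(loops[i], loops[m]) and
--                 are_non_touching(loops[j], loops[m]) and
--                 are_non_touching(loops[k], loops[m]) and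
--                 are_non_touching(loops[l], loops[m])):
--                 non_touching_loops[5].append((i, j, k, l, m))
--
--     # Remove empty categories
--     for key in list(non_touching_loops.keys()):
--         if not non_touching_loops[key]:
--             del non_touching_loops[key]
--
--     return non_touching_loops
-- ===== SOURCE B (Python) =====
-- def find_non_touching_loops(loops):
--     """Find all combinations of non-touching loops (generate-and-test over all
--     index combinations of each size 2..5, instead of extending smaller combos)."""
--
--     def are_non_touching(loop1, loop2):
--         return set(loop1[:-1]).isdisjoint(set(loop2[:-1]))
--
--     def combos(xs, r):
--         # all r-element combinations of xs, as tuples, in lexicographic order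
--         if r == 0:
--             return [()]
--         if not xs:
--             return []
--         first, rest = xs[0], xs[1:]
--         return [(first,) + c for c in combos(rest, r - 1)] + combos(rest, r)
--
--     n = len(loops)
--     result = {}
--     for size in range(2, 6):
--         good = [c for c in combos(list(range(n)), size)
--                 if all(are_non_touching(loops[i], loops[j])
--                        for i, j in combos(list(c), 2))]
--         if good:
--             result[size] = good
--     return result
-- ===== Notes on version B (the rewrite author's own statement) =====
-- stated objective: idiomatic
-- what changed: A incrementally extends previously found non-touching combinations level by level; B exhaustively enumerates all index combinations of each size 2..5 (hand-rolled lexicographic combinations, as A imports nothing) and keeps a combination iff all its member pairs are non-touching.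
import Mathlib
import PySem

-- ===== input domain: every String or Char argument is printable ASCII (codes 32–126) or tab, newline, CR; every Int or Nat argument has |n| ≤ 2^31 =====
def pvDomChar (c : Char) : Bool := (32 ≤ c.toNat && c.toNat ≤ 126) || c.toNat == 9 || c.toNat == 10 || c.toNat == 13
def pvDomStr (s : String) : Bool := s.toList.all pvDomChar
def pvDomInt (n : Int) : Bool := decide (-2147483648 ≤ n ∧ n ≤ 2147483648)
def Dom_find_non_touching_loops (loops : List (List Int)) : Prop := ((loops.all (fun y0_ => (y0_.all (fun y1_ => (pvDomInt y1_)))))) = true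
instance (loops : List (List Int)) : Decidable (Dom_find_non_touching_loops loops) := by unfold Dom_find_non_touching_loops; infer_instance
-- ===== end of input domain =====

-- B replaces A's level-by-level extension of previously found combinations by a
-- generate-and-test over all index combinations of each size 2..5 (idiomatic; not faster).

-- ===== PORT A =====
-- are_non_touching: len(set(loop1[:-1]) & set(loop2[:-1])) == 0
def fntlA_nt (loop1 loop2 : List Int) : Bool :=
  let nodes1 := PySem.Set.ofList (PySem.List.slice loop1 none (some (-1)))
  let nodes2 := PySem.Set.ofList (PySem.List.slice loop2 none (some (-1)))
  PySem.Set.len (PySem.Set.inter nodes1 nodes2) == 0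

def find_non_touching_loops (loops : List (List Int)) : List (Int × List (List Int)) :=
  let n := PySem.List.len loops
  -- loops[i]: i is always a valid index here (drawn from range(n_loops)), so pyGetD is exact
  let get := fun (i : Int) => PySem.List.pyGetD loops i []
  -- pairs appended into non_touching_loops[2]
  let p2 : List (Int × Int) :=
    (PySem.List.pyRange 0 n 1).foldl (fun acc i =>
      (PySem.List.pyRange (i + 1) n 1).foldl (fun acc j =>
        if fntlA_nt (get i) (get j) then acc ++ [(i, j)] else acc) acc) []
  -- triplets appended into non_touching_loops[3]
  let p3 : List (Int × Int × Int) :=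
    p2.foldl (fun acc ij =>
      (PySem.List.pyRange (max ij.1 ij.2 + 1) n 1).foldl (fun acc k =>
        if fntlA_nt (get ij.1) (get k) && fntlA_nt (get ij.2) (get k) then
          acc ++ [(ij.1, ij.2, k)] else acc) acc) []
  -- quadruplets
  let p4 : List (Int × Int × Int × Int) :=
    p3.foldl (fun acc t =>
      (PySem.List.pyRange (max (max t.1 t.2.1) t.2.2 + 1) n 1).foldl (fun acc l =>
        if fntlA_nt (get t.1) (get l) && fntlA_nt (get t.2.1) (get l) &&
           fntlA_nt (get t.2.2) (get l) then
          acc ++ [(t.1, t.2.1, t.2.2, l)] else acc) acc) []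
  -- quintuplets
  let p5 : List (Int × Int × Int × Int × Int) :=
    p4.foldl (fun acc q =>
      (PySem.List.pyRange (max (max (max q.1 q.2.1) q.2.2.1) q.2.2.2 + 1) n 1).foldl (fun acc m =>
        if fntlA_nt (get q.1) (get m) && fntlA_nt (get q.2.1) (get m) &&
           fntlA_nt (get q.2.2.1) (get m) && fntlA_nt (get q.2.2.2) (get m) then
          acc ++ [(q.1, q.2.1, q.2.2.1, q.2.2.2, m)] else acc) acc) []
  -- the dict {2: …, 3: …, 4: …, 5: …} after all appends (tuples rendered as lists)
  let d0 : List (Int × List (List Int)) :=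
    [(2, p2.map fun q => [q.1, q.2]),
     (3, p3.map fun q => [q.1, q.2.1, q.2.2]),
     (4, p4.map fun q => [q.1, q.2.1, q.2.2.1, q.2.2.2]),
     (5, p5.map fun q => [q.1, q.2.1, q.2.2.1, q.2.2.2.1, q.2.2.2.2])]
  -- for key in list(keys): if not d[key]: del d[key]   (dict as assoc list; keys are distinct)
  (d0.map Prod.fst).foldl (fun d k =>
    if (d.lookup k).getD [] == [] then d.eraseP (fun kv => k == kv.1) else d) d0

-- ===== PORT B =====
-- are_non_touching: set(loop1[:-1]).isdisjoint(set(loop2[:-1]))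
def fntlB_nt (loop1 loop2 : List Int) : Bool :=
  PySem.Set.isdisjoint (PySem.Set.ofList (PySem.List.slice loop1 none (some (-1))))
    (PySem.Set.ofList (PySem.List.slice loop2 none (some (-1))))

-- combos(xs, r): all r-element combinations of xs, in lexicographic order
def fntlB_combos (xs : List Int) (r : Int) : List (List Int) :=
  if r = 0 then [[]]
  else
    match xs with
    | [] => []
    | x :: rest => (fntlB_combos rest (r - 1)).map (x :: ·) ++ fntlB_combos rest r

def find_non_touching_loops_alt (loops : List (List Int)) : List (Int × List (List Int)) :=
  let n := PySem.List.len loops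
  (PySem.List.pyRange 2 6 1).foldl (fun result size =>
    let good := (fntlB_combos (PySem.List.pyRange 0 n 1) size).filter (fun c =>
      (fntlB_combos c 2).all (fun p =>
        match p with
        | [i, j] => fntlB_nt (PySem.List.pyGetD loops i []) (PySem.List.pyGetD loops j [])
        | _ => true))  -- members of combos(c, 2) always have length 2
    if good == [] then result else result ++ [(size, good)]) []

-- ===== PRECONDITION & SPEC =====
def Spec_find_non_touching_loops (loops : List (List Int)) (out : List (Int × List (List Int))) : Prop := out = find_non_touching_loops_alt loops
instance (loops : List (List Int)) (out : List (Int × List (List Int))) : Decidable (Spec_find_non_touching_loops loops out) := by unfold Spec_find_non_touching_loops; infer_instance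

-- ===== CLAIM (what is proved, stated in full; the proofs are below) =====
def Claim_equal_find_non_touching_loops : Prop := ∀ (loops : List (List Int)), Dom_find_non_touching_loops loops → Spec_find_non_touching_loops loops (find_non_touching_loops loops)

-- ===== LEMMAS AND PROOFS =====


def pvPairOK (P : Int → Int → Bool) : List Int → Bool :=
  fun p => match p with | [i, j] => P i j | _ => true

def pvG (P : Int → Int → Bool) (c : List Int) : Bool :=
  (PySem.List.combinations c 2).all (pvPairOK P)

lemma pvG_nil (P : Int → Int → Bool) : pvG P [] = true := rfl

lemma pvG_singleton (P : Int → Int → Bool) (a : Int) : pvG P [a] = true := by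
  simp [pvG, PySem.List.combinations_cons_succ, PySem.List.combinations_nil_succ]

lemma pvG_cons (P : Int → Int → Bool) (a : Int) (d : List Int) :
    pvG P (a :: d) = (d.all (fun y => P a y) && pvG P d) := by
  simp only [pvG, PySem.List.combinations_cons_succ, PySem.List.combinations_one,
    List.all_append, List.all_map]
  congr 1

lemma fntl_nt_eq (l1 l2 : List Int) : fntlA_nt l1 l2 = fntlB_nt l1 l2 := by
  simp only [fntlA_nt, fntlB_nt]
  apply Bool.eq_iff_iff.mpr
  rw [PySem.Set.isdisjoint_iff, beq_iff_eq, PySem.Set.len,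
    Int.natCast_eq_zero, List.length_eq_zero_iff, List.eq_nil_iff_forall_not_mem]
  constructor
  · intro h x hx hx2
    exact h x ((PySem.Set.mem_inter _ _ _).mpr ⟨hx, hx2⟩)
  · intro h x hx
    have hm := (PySem.Set.mem_inter _ _ _).mp hx
    exact h x hm.1 hm.2

lemma fntl_combos_eq (xs : List Int) (r : Nat) :
    fntlB_combos xs (r : Int) = PySem.List.combinations xs r := by
  induction xs generalizing r with
  | nil =>
      cases r with
      | zero => rfl
      | succ k =>
          rw [fntlB_combos, if_neg (by omega : ¬ (((k + 1 : Nat) : Int) = 0)),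
            PySem.List.combinations_nil_succ]
  | cons x rest ih =>
      cases r with
      | zero => simp [fntlB_combos, PySem.List.combinations_zero]
      | succ k =>
          rw [fntlB_combos, if_neg (by omega : ¬ (((k + 1 : Nat) : Int) = 0)),
            PySem.List.combinations_cons_succ,
            (by push_cast; ring : ((k + 1 : Nat) : Int) - 1 = (k : Int)), ih k, ih (k + 1)]

lemma pvRangeFilter (m n : Int) (hm : 0 ≤ m) :
    (PySem.List.pyRange 0 n 1).filter (fun x => decide (m < x)) = PySem.List.pyRange (m + 1) n 1 := by
  by_cases h : n ≤ m + 1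
  · rw [PySem.List.pyRange_one_eq_nil h, List.filter_eq_nil_iff]
    intro x hx
    rw [PySem.List.mem_pyRange_one] at hx
    simp; omega
  · rw [PySem.List.pyRange_one_append 0 (m + 1) n (by omega) (by omega), List.filter_append]
    have h1 : (PySem.List.pyRange 0 (m + 1) 1).filter (fun x => decide (m < x)) = [] := by
      rw [List.filter_eq_nil_iff]
      intro x hx
      rw [PySem.List.mem_pyRange_one] at hx
      simp; omega
    have h2 : (PySem.List.pyRange (m + 1) n 1).filter (fun x => decide (m < x)) = PySem.List.pyRange (m + 1) n 1 := by
      rw [List.filter_eq_self]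
      intro x hx
      rw [PySem.List.mem_pyRange_one] at hx
      simp; omega
    rw [h1, h2, List.nil_append]

def pvPhi (P : Int → Int → Bool) (u : Int → Bool) (c : List Int) : Bool :=
  c.all u && pvG P c

def pvExt (P : Int → Int → Bool) (u : Int → Bool) (xs : List Int) (c : List Int) : List (List Int) :=
  (xs.filter (fun x => decide (c.getLastD 0 < x) && u x && c.all (fun y => P y x))).map (fun x => c ++ [x])

lemma pv_ne_nil_of_mem_comb (t : List Int) (m : Nat) (d : List Int)
    (hd : d ∈ PySem.List.combinations t (m + 1)) : d ≠ [] := by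
  have := PySem.List.length_of_mem_combinations hd
  intro h; subst h; simp at this

lemma pv_lastD_mem_of_mem_comb (t : List Int) (m : Nat) (d : List Int)
    (hd : d ∈ PySem.List.combinations t (m + 1)) : d.getLastD 0 ∈ t := by
  have hne := pv_ne_nil_of_mem_comb t m d hd
  have hsub := PySem.List.sublist_of_mem_combinations hd
  have hmem : d.getLastD 0 ∈ d := by
    rw [List.getLastD_eq_getLast?, List.getLast?_eq_some_getLast hne, Option.getD_some]
    exact List.getLast_mem hne
  exact hsub.mem hmem

lemma pv_phi_cons (P : Int → Int → Bool) (u : Int → Bool) (a : Int) (d : List Int) :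
    pvPhi P u (a :: d) = (u a && pvPhi P (fun y => u y && P a y) d) := by
  simp only [pvPhi, pvG_cons, List.all_cons]
  apply Bool.eq_iff_iff.mpr
  simp only [Bool.and_eq_true, List.all_eq_true]
  constructor
  · rintro ⟨⟨h1, h2⟩, h3, h4⟩
    exact ⟨h1, fun x hx => ⟨h2 x hx, h3 x hx⟩, h4⟩
  · rintro ⟨h1, h2, h3⟩
    exact ⟨⟨h1, fun x hx => (h2 x hx).1⟩, fun x hx => (h2 x hx).2, h3⟩

lemma pvGen (P : Int → Int → Bool) : ∀ (xs : List Int), xs.Pairwise (· < ·) →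
    ∀ (u : Int → Bool) (k : Nat),
    (PySem.List.combinations xs (k + 2)).filter (pvPhi P u)
      = ((PySem.List.combinations xs (k + 1)).filter (pvPhi P u)).flatMap (pvExt P u xs) := by
  intro xs
  induction xs with
  | nil =>
      intro _ u k
      simp [PySem.List.combinations_nil_succ]
  | cons a t ih =>
      intro hp u k
      obtain ⟨ha', ht⟩ := List.pairwise_cons.mp hp
      have ha : ∀ x ∈ t, a < x := ha'
      -- unfold the combinations of (a :: t) on both sides
      rw [PySem.List.combinations_cons_succ a t (k + 1),
        PySem.List.combinations_cons_succ a t k,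
        List.filter_append, List.filter_append, List.filter_map, List.filter_map,
        List.flatMap_append, List.flatMap_map]
      -- second summands agree
      have claim2 : (PySem.List.combinations t (k + 2)).filter (pvPhi P u)
          = ((PySem.List.combinations t (k + 1)).filter (pvPhi P u)).flatMap (pvExt P u (a :: t)) := by
        rw [ih ht u k]
        apply List.flatMap_congr
        intro c hc
        rw [List.mem_filter] at hc
        have hlast := pv_lastD_mem_of_mem_comb t k c hc.1
        simp only [pvExt, List.filter_cons]
        rw [if_neg (by
          simp only [Bool.and_eq_true, decide_eq_true_eq, not_and]
          intro h1
          exact absurd h1.1 (not_lt.mpr (le_of_lt (ha _ hlast))))]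
      -- first summands agree
      have claim1 : ((PySem.List.combinations t (k + 1)).filter (fun d => pvPhi P u (a :: d))).map (a :: ·)
          = ((PySem.List.combinations t k).filter (fun d => pvPhi P u (a :: d))).flatMap
              (fun d => pvExt P u (a :: t) (a :: d)) := by
        by_cases hua : u a = true
        · have hfilt : ∀ (m : Nat), (PySem.List.combinations t m).filter (fun d => pvPhi P u (a :: d))
              = (PySem.List.combinations t m).filter (pvPhi P (fun y => u y && P a y)) := by
            intro m
            apply List.filter_congr
            intro d _
            rw [pv_phi_cons, hua, Bool.true_and]
          rw [hfilt, hfilt]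
          cases k with
          | zero =>
              rw [PySem.List.combinations_zero, PySem.List.combinations_one]
              rw [List.filter_map]
              have hfe : List.filter (pvPhi P (fun y => u y && P a y) ∘ fun x => [x]) t
                  = t.filter (fun y => u y && P a y) := by
                apply List.filter_congr
                intro y _
                simp [Function.comp, pvPhi, pvG_singleton]
              rw [hfe]
              have hnil : List.filter (pvPhi P (fun y => u y && P a y)) [[]] = [[]] := by
                simp [pvPhi, pvG_nil]
              rw [hnil]
              simp only [List.flatMap_cons, List.flatMap_nil, List.append_nil]
              simp only [pvExt, List.filter_cons]
              rw [if_neg (by simp [List.getLastD])]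
              have hfe2 : List.filter
                  (fun x => decide (([a] : List Int).getLastD 0 < x) && u x && ([a] : List Int).all (fun y => P y x)) t
                  = t.filter (fun y => u y && P a y) := by
                apply List.filter_congr
                intro y hy
                have hlaD : ([a] : List Int).getLastD 0 = a := by simp [List.getLastD]
                simp only [hlaD, List.all_cons, List.all_nil, Bool.and_true]
                rw [decide_eq_true (ha y hy), Bool.true_and]
              rw [hfe2, List.map_map]
              apply List.map_congr_left
              intro y _
              simp
          | succ k' =>
              rw [ih ht (fun y => u y && P a y) k']
              rw [List.map_flatMap]
              apply List.flatMap_congr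
              intro d hd
              rw [List.mem_filter] at hd
              have hne := pv_ne_nil_of_mem_comb t k' d hd.1
              have hlast := pv_lastD_mem_of_mem_comb t k' d hd.1
              have hlcons : (a :: d).getLastD 0 = d.getLastD 0 := by
                cases d with
                | nil => simp at hne
                | cons b t' => simp
              simp only [pvExt, List.filter_cons, hlcons]
              rw [if_neg (by
                simp only [Bool.and_eq_true, decide_eq_true_eq, not_and]
                intro h1
                exact absurd h1.1 (not_lt.mpr (le_of_lt (ha _ hlast))))]
              have hfe : List.filter
                  (fun x => decide (d.getLastD 0 < x) && u x && (a :: d).all (fun y => P y x)) t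
                  = List.filter (fun x => decide (d.getLastD 0 < x) && (u x && P a x) && d.all (fun y => P y x)) t := by
                apply List.filter_congr
                intro x _
                simp only [List.all_cons]
                apply Bool.eq_iff_iff.mpr
                simp only [Bool.and_eq_true, decide_eq_true_eq]
                tauto
              rw [hfe, List.map_map]
              rfl
        · simp only [Bool.not_eq_true] at hua
          have hz : ∀ (m : Nat), (PySem.List.combinations t m).filter (fun d => pvPhi P u (a :: d)) = [] := by
            intro m
            rw [List.filter_eq_nil_iff]
            intro d _
            rw [pv_phi_cons, hua]
            simp
          rw [hz, hz]
          simp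
      simp only [Function.comp_def]
      rw [show k + 1 + 1 = k + 2 from rfl, claim1, claim2]

def pvGet (loops : List (List Int)) (i : Int) : List Int := PySem.List.pyGetD loops i []

def pvP (loops : List (List Int)) (i j : Int) : Bool :=
  fntlA_nt (pvGet loops i) (pvGet loops j)

def pvN (loops : List (List Int)) : Int := PySem.List.len loops

def pvR (loops : List (List Int)) : List Int := PySem.List.pyRange 0 (pvN loops) 1

def pvF (loops : List (List Int)) (s : Nat) : List (List Int) :=
  (PySem.List.combinations (pvR loops) s).filter (pvG (pvP loops))

lemma filter_pvG_eq_phi (P : Int → Int → Bool) (l : List (List Int)) :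
    l.filter (pvG P) = l.filter (pvPhi P (fun _ => true)) :=
  (List.filter_congr (fun c _ => by simp [pvPhi])).symm

lemma pvF_one (loops : List (List Int)) : pvF loops 1 = (pvR loops).map (fun i => [i]) := by
  unfold pvF
  rw [PySem.List.combinations_one, List.filter_map, List.filter_eq_self.mpr]
  intro x _
  simp [Function.comp, pvG_singleton]

lemma pvF_succ (loops : List (List Int)) (k : Nat) :
    pvF loops (k + 2) = (pvF loops (k + 1)).flatMap (pvExt (pvP loops) (fun _ => true) (pvR loops)) := by
  unfold pvF
  rw [filter_pvG_eq_phi, filter_pvG_eq_phi,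
    pvGen (pvP loops) (pvR loops) (PySem.List.pairwise_lt_pyRange_one 0 (pvN loops)) (fun _ => true) k]

lemma pv_foldl_nested {α β γ : Type} (l : List α) (r : α → List β) (p : α → β → Bool) (f : α → β → γ) :
    l.foldl (fun acc t => (r t).foldl (fun acc x => if p t x then acc ++ [f t x] else acc) acc) []
      = l.flatMap (fun t => ((r t).filter (p t)).map (f t)) := by
  rw [PySem.List.foldl_congr_mem l _ (fun acc t => acc ++ ((r t).filter (p t)).map (f t)) []
      (fun acc t _ => PySem.List.foldl_append_if (p t) (f t) (r t) acc),
    PySem.List.foldl_append_eq_flatMap, List.nil_append]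

lemma pvRangeFilter2 (m n : Int) (hm : 0 ≤ m) (q : Int → Bool) :
    (PySem.List.pyRange 0 n 1).filter (fun x => q x && decide (m < x))
      = (PySem.List.pyRange (m + 1) n 1).filter q := by
  rw [← List.filter_filter, pvRangeFilter m n hm]

def pvA2 (loops : List (List Int)) : List (Int × Int) :=
  (PySem.List.pyRange 0 (pvN loops) 1).foldl (fun acc i =>
    (PySem.List.pyRange (i + 1) (pvN loops) 1).foldl (fun acc j =>
      if pvP loops i j then acc ++ [(i, j)] else acc) acc) []

lemma pvA2_flat (loops : List (List Int)) : pvA2 loops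
    = (pvR loops).flatMap (fun i =>
        ((PySem.List.pyRange (i + 1) (pvN loops) 1).filter (fun j => pvP loops i j)).map
          (fun j => (i, j))) := by
  unfold pvA2
  exact pv_foldl_nested _ _ _ _

lemma pvA2_eq (loops : List (List Int)) :
    (pvA2 loops).map (fun q => [q.1, q.2]) = pvF loops 2 := by
  rw [pvA2_flat, pvF_succ loops 0, pvF_one, List.map_flatMap, List.flatMap_map]
  apply List.flatMap_congr
  intro i hi
  obtain ⟨h0, _⟩ := PySem.List.mem_pyRange_one.mp hi
  show (((PySem.List.pyRange (i + 1) (pvN loops) 1).filter (fun j => pvP loops i j)).map _).map _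
      = pvExt (pvP loops) (fun _ => true) (pvR loops) [i]
  unfold pvExt pvR
  have hc : ∀ x : Int,
      (decide (([i] : List Int).getLastD 0 < x) && (fun (_ : Int) => true) x
        && (([i] : List Int).all fun y => pvP loops y x))
      = (pvP loops i x && decide (i < x)) := by
    intro x
    simp only [List.getLastD, List.all_cons, List.all_nil, Bool.and_true, Bool.true_and]
    exact Bool.and_comm _ _
  rw [List.filter_congr (fun x _ => hc x), ← List.filter_filter,
    pvRangeFilter i (pvN loops) h0, List.map_map]
  apply List.map_congr_left
  intro j _
  simp

lemma mem_pvA2 (loops : List (List Int)) (q : Int × Int) (hq : q ∈ pvA2 loops) :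
    0 ≤ q.1 ∧ q.1 < q.2 ∧ q.2 < pvN loops := by
  rw [pvA2_flat] at hq
  simp only [List.mem_flatMap, List.mem_map, List.mem_filter, pvR,
    PySem.List.mem_pyRange_one] at hq
  obtain ⟨i, ⟨hi0, hin⟩, j, ⟨⟨hj1, hj2⟩, _⟩, hqe⟩ := hq
  subst hqe
  exact ⟨hi0, by omega, hj2⟩

def pvA3 (loops : List (List Int)) : List (Int × Int × Int) :=
  (pvA2 loops).foldl (fun acc ij =>
    (PySem.List.pyRange (max ij.1 ij.2 + 1) (pvN loops) 1).foldl (fun acc k =>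
      if pvP loops ij.1 k && pvP loops ij.2 k then acc ++ [(ij.1, ij.2, k)] else acc) acc) []

lemma pvA3_flat (loops : List (List Int)) : pvA3 loops
    = (pvA2 loops).flatMap (fun ij =>
        ((PySem.List.pyRange (max ij.1 ij.2 + 1) (pvN loops) 1).filter
          (fun k => pvP loops ij.1 k && pvP loops ij.2 k)).map (fun k => (ij.1, ij.2, k))) := by
  unfold pvA3
  exact pv_foldl_nested _ _ _ _

lemma pvA3_eq (loops : List (List Int)) :
    (pvA3 loops).map (fun q => [q.1, q.2.1, q.2.2]) = pvF loops 3 := by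
  rw [pvA3_flat, show (3 : Nat) = 1 + 2 from rfl, pvF_succ loops 1, ← pvA2_eq,
    List.map_flatMap, List.flatMap_map]
  apply List.flatMap_congr
  intro q hq
  obtain ⟨h0, hij, hjn⟩ := mem_pvA2 loops q hq
  show (((PySem.List.pyRange (max q.1 q.2 + 1) (pvN loops) 1).filter _).map _).map _
      = pvExt (pvP loops) (fun _ => true) (pvR loops) [q.1, q.2]
  unfold pvExt pvR
  have hc : ∀ x : Int,
      (decide (([q.1, q.2] : List Int).getLastD 0 < x) && (fun (_ : Int) => true) x
        && (([q.1, q.2] : List Int).all fun y => pvP loops y x))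
      = ((pvP loops q.1 x && pvP loops q.2 x) && decide (q.2 < x)) := by
    intro x
    simp only [List.getLastD, List.all_cons, List.all_nil, Bool.and_true]
    apply Bool.eq_iff_iff.mpr
    simp only [Bool.and_eq_true]
    tauto
  rw [List.filter_congr (fun x _ => hc x), pvRangeFilter2 q.2 (pvN loops) (by omega) _,
    List.map_map, show max q.1 q.2 = q.2 from max_eq_right (le_of_lt hij)]
  apply List.map_congr_left
  intro k _
  simp

lemma mem_pvA3 (loops : List (List Int)) (q : Int × Int × Int) (hq : q ∈ pvA3 loops) :
    0 ≤ q.1 ∧ q.1 < q.2.1 ∧ q.2.1 < q.2.2 ∧ q.2.2 < pvN loops := by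
  rw [pvA3_flat] at hq
  simp only [List.mem_flatMap, List.mem_map, List.mem_filter,
    PySem.List.mem_pyRange_one] at hq
  obtain ⟨ij, hij, k, ⟨⟨hk1, hk2⟩, _⟩, hqe⟩ := hq
  obtain ⟨h0, hlt, hn⟩ := mem_pvA2 loops ij hij
  subst hqe
  simp only []
  refine ⟨h0, hlt, ?_, hk2⟩
  have := le_max_right ij.1 ij.2
  omega

def pvA4 (loops : List (List Int)) : List (Int × Int × Int × Int) :=
  (pvA3 loops).foldl (fun acc t =>
    (PySem.List.pyRange (max (max t.1 t.2.1) t.2.2 + 1) (pvN loops) 1).foldl (fun acc l =>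
      if pvP loops t.1 l && pvP loops t.2.1 l && pvP loops t.2.2 l then
        acc ++ [(t.1, t.2.1, t.2.2, l)] else acc) acc) []

lemma pvA4_flat (loops : List (List Int)) : pvA4 loops
    = (pvA3 loops).flatMap (fun t =>
        ((PySem.List.pyRange (max (max t.1 t.2.1) t.2.2 + 1) (pvN loops) 1).filter
          (fun l => pvP loops t.1 l && pvP loops t.2.1 l && pvP loops t.2.2 l)).map
          (fun l => (t.1, t.2.1, t.2.2, l))) := by
  unfold pvA4
  exact pv_foldl_nested _ _ _ _

lemma pvA4_eq (loops : List (List Int)) :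
    (pvA4 loops).map (fun q => [q.1, q.2.1, q.2.2.1, q.2.2.2]) = pvF loops 4 := by
  rw [pvA4_flat, show (4 : Nat) = 2 + 2 from rfl, pvF_succ loops 2, ← pvA3_eq,
    List.map_flatMap, List.flatMap_map]
  apply List.flatMap_congr
  intro q hq
  obtain ⟨h0, h12, h23, hn⟩ := mem_pvA3 loops q hq
  show (((PySem.List.pyRange (max (max q.1 q.2.1) q.2.2 + 1) (pvN loops) 1).filter _).map _).map _
      = pvExt (pvP loops) (fun _ => true) (pvR loops) [q.1, q.2.1, q.2.2]
  unfold pvExt pvR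
  have hc : ∀ x : Int,
      (decide (([q.1, q.2.1, q.2.2] : List Int).getLastD 0 < x) && (fun (_ : Int) => true) x
        && (([q.1, q.2.1, q.2.2] : List Int).all fun y => pvP loops y x))
      = ((pvP loops q.1 x && pvP loops q.2.1 x && pvP loops q.2.2 x) && decide (q.2.2 < x)) := by
    intro x
    simp only [List.getLastD, List.all_cons, List.all_nil, Bool.and_true]
    apply Bool.eq_iff_iff.mpr
    simp only [Bool.and_eq_true]
    tauto
  rw [List.filter_congr (fun x _ => hc x), pvRangeFilter2 q.2.2 (pvN loops) (by omega) _,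
    List.map_map, show max (max q.1 q.2.1) q.2.2 = q.2.2 by omega]
  apply List.map_congr_left
  intro l _
  simp

lemma mem_pvA4 (loops : List (List Int)) (q : Int × Int × Int × Int) (hq : q ∈ pvA4 loops) :
    0 ≤ q.1 ∧ q.1 < q.2.1 ∧ q.2.1 < q.2.2.1 ∧ q.2.2.1 < q.2.2.2 ∧ q.2.2.2 < pvN loops := by
  rw [pvA4_flat] at hq
  simp only [List.mem_flatMap, List.mem_map, List.mem_filter,
    PySem.List.mem_pyRange_one] at hq
  obtain ⟨t, ht, l, ⟨⟨hl1, hl2⟩, _⟩, hqe⟩ := hq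
  obtain ⟨h0, h12, h23, hn⟩ := mem_pvA3 loops t ht
  subst hqe
  simp only []
  have h1 := le_max_left (max t.1 t.2.1) t.2.2
  have h2 := le_max_right (max t.1 t.2.1) t.2.2
  refine ⟨h0, h12, h23, ?_, hl2⟩
  omega

def pvA5 (loops : List (List Int)) : List (Int × Int × Int × Int × Int) :=
  (pvA4 loops).foldl (fun acc t0 =>
    (PySem.List.pyRange (max (max (max t0.1 t0.2.1) t0.2.2.1) t0.2.2.2 + 1) (pvN loops) 1).foldl (fun acc m =>
      if pvP loops t0.1 m && pvP loops t0.2.1 m && pvP loops t0.2.2.1 m && pvP loops t0.2.2.2 m then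
        acc ++ [(t0.1, t0.2.1, t0.2.2.1, t0.2.2.2, m)] else acc) acc) []

lemma pvA5_flat (loops : List (List Int)) : pvA5 loops
    = (pvA4 loops).flatMap (fun t0 =>
        ((PySem.List.pyRange (max (max (max t0.1 t0.2.1) t0.2.2.1) t0.2.2.2 + 1) (pvN loops) 1).filter
          (fun m => pvP loops t0.1 m && pvP loops t0.2.1 m && pvP loops t0.2.2.1 m && pvP loops t0.2.2.2 m)).map
          (fun m => (t0.1, t0.2.1, t0.2.2.1, t0.2.2.2, m))) := by
  unfold pvA5
  exact pv_foldl_nested _ _ _ _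

lemma pvA5_eq (loops : List (List Int)) :
    (pvA5 loops).map (fun q => [q.1, q.2.1, q.2.2.1, q.2.2.2.1, q.2.2.2.2]) = pvF loops 5 := by
  rw [pvA5_flat, show (5 : Nat) = 3 + 2 from rfl, pvF_succ loops 3, ← pvA4_eq,
    List.map_flatMap, List.flatMap_map]
  apply List.flatMap_congr
  intro q hq
  obtain ⟨h0, h12, h23, h34, hn⟩ := mem_pvA4 loops q hq
  show (((PySem.List.pyRange (max (max (max q.1 q.2.1) q.2.2.1) q.2.2.2 + 1) (pvN loops) 1).filter _).map _).map _
      = pvExt (pvP loops) (fun _ => true) (pvR loops) [q.1, q.2.1, q.2.2.1, q.2.2.2]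
  unfold pvExt pvR
  have hc : ∀ x : Int,
      (decide (([q.1, q.2.1, q.2.2.1, q.2.2.2] : List Int).getLastD 0 < x) && (fun (_ : Int) => true) x
        && (([q.1, q.2.1, q.2.2.1, q.2.2.2] : List Int).all fun y => pvP loops y x))
      = ((pvP loops q.1 x && pvP loops q.2.1 x && pvP loops q.2.2.1 x && pvP loops q.2.2.2 x) && decide (q.2.2.2 < x)) := by
    intro x
    simp only [List.getLastD, List.all_cons, List.all_nil, Bool.and_true]
    apply Bool.eq_iff_iff.mpr
    simp only [Bool.and_eq_true]
    tauto
  rw [List.filter_congr (fun x _ => hc x), pvRangeFilter2 q.2.2.2 (pvN loops) (by omega) _,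
    List.map_map, show max (max (max q.1 q.2.1) q.2.2.1) q.2.2.2 = q.2.2.2 by omega]
  apply List.map_congr_left
  intro m _
  simp

def pvB (loops : List (List Int)) (s : Int) : List (List Int) :=
  (fntlB_combos (PySem.List.pyRange 0 (PySem.List.len loops) 1) s).filter (fun c =>
    (fntlB_combos c 2).all (fun p =>
      match p with
      | [i, j] => fntlB_nt (PySem.List.pyGetD loops i []) (PySem.List.pyGetD loops j [])
      | _ => true))

lemma pairOK_B_eq (loops : List (List Int)) : ∀ p : List Int,
    (match p with
      | [i, j] => fntlB_nt (PySem.List.pyGetD loops i []) (PySem.List.pyGetD loops j [])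
      | _ => true)
    = pvPairOK (pvP loops) p := by
  intro p
  match p with
  | [] => rfl
  | [_] => rfl
  | [i, j] =>
      show fntlB_nt (PySem.List.pyGetD loops i []) (PySem.List.pyGetD loops j []) = pvP loops i j
      rw [pvP, pvGet, pvGet, fntl_nt_eq]
  | _ :: _ :: _ :: _ => rfl

lemma pvB_eq (loops : List (List Int)) (s : Nat) : pvB loops (s : Int) = pvF loops s := by
  unfold pvB pvF pvR pvN
  rw [fntl_combos_eq]
  apply List.filter_congr
  intro c _
  rw [show fntlB_combos c (2 : Int) = PySem.List.combinations c 2 from by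
    have h := fntl_combos_eq c 2
    rwa [Nat.cast_ofNat] at h]
  unfold pvG
  exact congrArg _ (funext (pairOK_B_eq loops))

def pvD0 (loops : List (List Int)) : List (Int × List (List Int)) :=
  [(2, (pvA2 loops).map fun q => [q.1, q.2]),
   (3, (pvA3 loops).map fun q => [q.1, q.2.1, q.2.2]),
   (4, (pvA4 loops).map fun q => [q.1, q.2.1, q.2.2.1, q.2.2.2]),
   (5, (pvA5 loops).map fun q => [q.1, q.2.1, q.2.2.1, q.2.2.2.1, q.2.2.2.2])]


lemma pv_find_eq (loops : List (List Int)) : find_non_touching_loops loops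
    = ((pvD0 loops).map Prod.fst).foldl (fun d k =>
        if (d.lookup k).getD [] == [] then d.eraseP (fun kv => k == kv.1) else d) (pvD0 loops) := rfl

lemma pv_alt_eq (loops : List (List Int)) : find_non_touching_loops_alt loops
    = (PySem.List.pyRange 2 6 1).foldl (fun result size =>
        if pvB loops size == [] then result else result ++ [(size, pvB loops size)]) [] := rfl


-- ===== VERDICT (by name: the statement is the Claim_ definition above) =====
theorem find_non_touching_loops_spec : Claim_equal_find_non_touching_loops := by
  intro loops _
  show find_non_touching_loops loops = find_non_touching_loops_alt loops
  rw [pv_find_eq, pv_alt_eq,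
    show PySem.List.pyRange 2 6 1 = [2, 3, 4, 5] from by decide]
  have e2 : pvB loops 2 = (pvA2 loops).map (fun q => [q.1, q.2]) := by
    have h := pvB_eq loops 2
    rw [Nat.cast_ofNat] at h
    rw [h, ← pvA2_eq]
  have e3 : pvB loops 3 = (pvA3 loops).map (fun q => [q.1, q.2.1, q.2.2]) := by
    have h := pvB_eq loops 3
    rw [Nat.cast_ofNat] at h
    rw [h, ← pvA3_eq]
  have e4 : pvB loops 4 = (pvA4 loops).map (fun q => [q.1, q.2.1, q.2.2.1, q.2.2.2]) := by
    have h := pvB_eq loops 4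
    rw [Nat.cast_ofNat] at h
    rw [h, ← pvA4_eq]
  have e5 : pvB loops 5 = (pvA5 loops).map (fun q => [q.1, q.2.1, q.2.2.1, q.2.2.2.1, q.2.2.2.2]) := by
    have h := pvB_eq loops 5
    rw [Nat.cast_ofNat] at h
    rw [h, ← pvA5_eq]
  simp only [List.foldl, pvD0, List.map, ← e2, ← e3, ← e4, ← e5]
  generalize pvB loops 2 = v2
  generalize pvB loops 3 = v3
  generalize pvB loops 4 = v4
  generalize pvB loops 5 = v5
  by_cases h2 : v2 = [] <;> by_cases h3 : v3 = [] <;> by_cases h4 : v4 = [] <;> by_cases h5 : v5 = [] <;>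
    simp [h2, h3, h4, h5, List.lookup, List.eraseP]
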